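-- pv_equiv track=rewrite | github.com/vinchinzu/euler | python/782/verify_comp2.py | get_comp2_k_values_v1
-- ===== SOURCE A (Python) =====
-- def get_comp2_k_values_v1(n):
--     achievable = set()
--     for a in range(n+1):
--         for b in range(n+1-a):
--             for c in range(n+1-a-b):
--                 d = n - a - b - c
--                 if c == 0 and d == 0:
--                     continue
--                 zero_is_P = (b + c == 0)
--                 zero_is_Q = (b + d == 0)
--                 ones_is_P = (a + d == 0)
--                 ones_is_Q = (a + c == 0)
--                 if a > 0 and not (zero_is_P or zero_is_Q):
--                     continue
--                 if b > 0 and not (ones_is_P or ones_is_Q):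
--                     continue
--                 possible_s = set()
--                 if c > 0 and d > 0:
--                     for sigma_choice in ['P', 'Q']:
--                         for comp_choice in ['P', 'Q']:
--                             s1 = (b + c) if sigma_choice == 'P' else (b + d)
--                             s2 = (a + d) if comp_choice == 'P' else (a + c)
--                             if s1 == s2:
--                                 possible_s.add(s1)
--                 elif c > 0:
--                     possible_s.add(b + c)
--                     possible_s.add(b + d)
--                 elif d > 0:
--                     possible_s.add(a + d)
--                     possible_s.add(a + c)
--                 for s in possible_s:
--                     if 0 <= s <= n:
--                         k = s * (b + c) + (n - s) * (b + d)
--                         if 0 < k < n * n: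
--                             achievable.add(k)
--                         k_comp = n * n - k
--                         if 0 < k_comp < n * n:
--                             achievable.add(k_comp)
--     return achievable
-- ===== SOURCE B (Python) =====
-- def get_comp2_k_values_v1(n):
--     achievable = set()
--     for c in range(1, n):
--         achievable.add(c * c + (n - c) * (n - c))
--         achievable.add(2 * c * (n - c))
--     for b in range(1, n):
--         achievable.add(b * (2 * n - b))
--         achievable.add((n - b) * (n - b))
--     return achievable
-- ===== Notes on version B (the rewrite author's own statement) =====
-- stated objective: faster
-- what changed: B replaces A's triple loop over all O(n^3) compositions (a,b,c,d) of n with two O(n) loops over the closed-form families of achievable values {c^2+(n-c)^2, 2c(n-c)} and {b(2n-b), (n-b)^2} that the constraints force (a>0 and b>0 is impossible, and every remaining valid tuple has two of the four parts zero).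
import Mathlib
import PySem

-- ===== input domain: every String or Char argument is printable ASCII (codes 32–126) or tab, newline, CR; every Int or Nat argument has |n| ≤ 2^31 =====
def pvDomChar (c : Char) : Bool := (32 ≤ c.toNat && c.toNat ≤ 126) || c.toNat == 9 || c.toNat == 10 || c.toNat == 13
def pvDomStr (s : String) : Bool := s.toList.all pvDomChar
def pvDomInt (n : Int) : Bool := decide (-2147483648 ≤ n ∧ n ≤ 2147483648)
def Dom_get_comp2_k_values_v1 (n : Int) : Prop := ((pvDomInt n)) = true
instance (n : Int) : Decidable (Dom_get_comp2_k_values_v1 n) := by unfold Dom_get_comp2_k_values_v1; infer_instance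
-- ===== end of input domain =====

-- B replaces A's O(n^3) triple loop over compositions of n by two O(n) loops over the
-- closed-form value families the constraints force; same returned set (compared as a set).

-- ===== PORT A =====
-- loop body of A's triple loop: processes one tuple (a, b, c) with d = n-a-b-c
def pvStepA (n : Int) (s : PySem.Set Int) (a b c : Int) : PySem.Set Int :=
  let d := n - a - b - c
  if c = 0 ∧ d = 0 then s
  else if 0 < a ∧ ¬(b + c = 0 ∨ b + d = 0) then s        -- zero_is_P / zero_is_Q
  else if 0 < b ∧ ¬(a + d = 0 ∨ a + c = 0) then s        -- ones_is_P / ones_is_Q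
  else
    let possible_s : PySem.Set Int :=
      if 0 < c ∧ 0 < d then
        ["P", "Q"].foldl (fun ps sigma_choice =>
          ["P", "Q"].foldl (fun ps comp_choice =>
            let s1 := if sigma_choice = "P" then b + c else b + d
            let s2 := if comp_choice = "P" then a + d else a + c
            if s1 = s2 then PySem.Set.add ps s1 else ps) ps) PySem.Set.empty
      else if 0 < c then
        PySem.Set.add (PySem.Set.add PySem.Set.empty (b + c)) (b + d)
      else if 0 < d then
        PySem.Set.add (PySem.Set.add PySem.Set.empty (a + d)) (a + c)
      else PySem.Set.empty
    possible_s.foldl (fun ach sv =>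
      if 0 ≤ sv ∧ sv ≤ n then
        let k := sv * (b + c) + (n - sv) * (b + d)
        let ach2 := if 0 < k ∧ k < n * n then PySem.Set.add ach k else ach
        let k_comp := n * n - k
        if 0 < k_comp ∧ k_comp < n * n then PySem.Set.add ach2 k_comp else ach2
      else ach) s

def get_comp2_k_values_v1 (n : Int) : List Int :=
  (PySem.List.pyRange 0 (n + 1) 1).foldl (fun s a =>
    (PySem.List.pyRange 0 (n + 1 - a) 1).foldl (fun s b =>
      (PySem.List.pyRange 0 (n + 1 - a - b) 1).foldl (fun s c =>
        pvStepA n s a b c) s) s) PySem.Set.empty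

-- ===== PORT B =====
def get_comp2_k_values_v1_alt (n : Int) : List Int :=
  let s1 := (PySem.List.pyRange 1 n 1).foldl (fun s c =>
    PySem.Set.add (PySem.Set.add s (c * c + (n - c) * (n - c))) (2 * c * (n - c)))
    PySem.Set.empty
  (PySem.List.pyRange 1 n 1).foldl (fun s b =>
    PySem.Set.add (PySem.Set.add s (b * (2 * n - b))) ((n - b) * (n - b))) s1

-- ===== PRECONDITION & SPEC =====
def Spec_get_comp2_k_values_v1 (n : Int) (out : List Int) : Prop := out = get_comp2_k_values_v1_alt n
instance (n : Int) (out : List Int) : Decidable (Spec_get_comp2_k_values_v1 n out) := by unfold Spec_get_comp2_k_values_v1; infer_instance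

-- ===== CLAIM (what is proved, stated in full; the proofs are below) =====
def Claim_equal_get_comp2_k_values_v1 : Prop := ∀ (n : Int), Dom_get_comp2_k_values_v1 n → Spec_get_comp2_k_values_v1 n (get_comp2_k_values_v1 n)

-- ===== LEMMAS AND PROOFS =====

-- a fold whose every step fixes states satisfying an invariant P fixes a P-state
theorem pvFoldlFix {α β : Type} (f : β → α → β) (P : β → Prop) :
    ∀ (l : List α) (s : β), P s → (∀ x ∈ l, ∀ t, P t → f t x = t) → l.foldl f s = s := by
  intro l
  induction l with
  | nil => intro s _ _; rfl
  | cons x xs ih =>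
    intro s hs h
    have hx : f s x = s := h x (by simp) s hs
    simp only [List.foldl_cons, hx]
    exact ih s hs (fun y hy t ht => h y (by simp [hy]) t ht)

-- membership is preserved and created by a double-add fold
theorem pvMemFold2Mono {f g : Int → Int} :
    ∀ (l : List Int) (s : PySem.Set Int) (y : Int), y ∈ s →
      y ∈ l.foldl (fun s b => PySem.Set.add (PySem.Set.add s (f b)) (g b)) s := by
  intro l
  induction l with
  | nil => intro s y hy; exact hy
  | cons x xs ih =>
    intro s y hy
    simp only [List.foldl_cons]
    exact ih _ y (by simp [PySem.Set.mem_add, hy])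

theorem pvMemFold2 {f g : Int → Int} :
    ∀ (l : List Int) (s : PySem.Set Int) (b : Int), b ∈ l →
      f b ∈ l.foldl (fun s b => PySem.Set.add (PySem.Set.add s (f b)) (g b)) s ∧
      g b ∈ l.foldl (fun s b => PySem.Set.add (PySem.Set.add s (f b)) (g b)) s := by
  intro l
  induction l with
  | nil => intro s b hb; simp at hb
  | cons x xs ih =>
    intro s b hb
    rcases List.mem_cons.mp hb with h | h
    · subst h
      simp only [List.foldl_cons]
      constructor
      · exact pvMemFold2Mono xs _ _ (by simp [PySem.Set.mem_add])
      · exact pvMemFold2Mono xs _ _ (by simp [PySem.Set.mem_add])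
    · simp only [List.foldl_cons]; exact ih _ b h

-- skipped tuples -----------------------------------------------------------

-- a > 0 and b > 0: the tuple is always skipped
theorem pvStepA_skip_ab {n a b c : Int} (ha : 0 < a) (hb : 0 < b)
    (hc : 0 ≤ c) (hd : 0 ≤ n - a - b - c) (s : PySem.Set Int) :
    pvStepA n s a b c = s := by
  simp only [pvStepA]
  split_ifs with h1 h2 <;> first | rfl | (exfalso; omega)

-- a = 0, b > 0, 0 < c < n - b: skipped
theorem pvStepA_skip_b_mid {n b c : Int} (hb : 0 < b) (hc : 0 < c)
    (hd : 0 < n - b - c) (s : PySem.Set Int) :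
    pvStepA n s 0 b c = s := by
  simp only [pvStepA]
  split_ifs with h1 h2 h3 <;> first | rfl | (exfalso; omega)

-- a > 0, b = 0, 0 < c < n - a: skipped
theorem pvStepA_skip_a_mid {n a c : Int} (ha : 0 < a) (hc : 0 < c)
    (hd : 0 < n - a - c) (s : PySem.Set Int) :
    pvStepA n s a 0 c = s := by
  simp only [pvStepA]
  split_ifs with h1 h2 <;> first | rfl | (exfalso; omega)



theorem pvStepA_000 {n : Int} (hn : 0 < n) (s : PySem.Set Int) :
    pvStepA n s 0 0 0 = s := by
  simp only [pvStepA]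
  split_ifs with h1 h2 h3 h4 h5 <;> try (exfalso; omega)
  have h0n : ¬ ((0:Int) = n) := by omega
  norm_num [PySem.Set.add_eq_ite, PySem.Set.empty, List.foldl, h0n]

theorem pvStepA_n00 {n : Int} (s : PySem.Set Int) :
    pvStepA n s n 0 0 = s := by
  simp only [pvStepA]
  split_ifs with h1 <;> first | rfl | (exfalso; omega)

theorem pvStepA_0n0 {n : Int} (s : PySem.Set Int) :
    pvStepA n s 0 n 0 = s := by
  simp only [pvStepA]
  split_ifs with h1 <;> first | rfl | (exfalso; omega)

theorem pvStepA_00c {n c : Int} (hc : 0 < c) (hcn : c < n) (s : PySem.Set Int) :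
    pvStepA n s 0 0 c =
      PySem.Set.add (PySem.Set.add s (c * c + (n - c) * (n - c))) (2 * c * (n - c)) := by
  have hQP : (("Q":String) = "P") = False := by decide
  have hmul : 0 < c * (n - c) := mul_pos hc (by omega)
  have e1 : n * n - (c * c + (n - c) * (n - c)) = 2 * c * (n - c) := by ring
  have e2 : (n - c) * c + (n - (n - c)) * (n - c) = 2 * c * (n - c) := by ring
  simp only [pvStepA]
  split_ifs with h1 h2 h3 h4 <;> try (exfalso; omega)
  norm_num [List.foldl, hQP]
  by_cases hcd : c = n - c
  · rw [if_pos hcd]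
    have hps : PySem.Set.add (PySem.Set.add [c] c) (n - c) = [c] := by
      simp [← hcd]
    rw [hps]
    simp only [List.foldl]
    rw [if_pos (show (0:Int) ≤ c ∧ c ≤ n by omega)]
    rw [if_pos (show c * c + (n - c) * (n - c) < n * n ∧ 0 < c * c + (n - c) * (n - c) by
      constructor <;> nlinarith)]
    rw [if_pos (show 0 < c * c + (n - c) * (n - c) ∧ c * c + (n - c) * (n - c) < n * n by
      constructor <;> nlinarith)]
    rw [e1]
  · rw [if_neg hcd]
    have hps : PySem.Set.add (PySem.Set.add ([] : List Int) c) (n - c) = [c, n - c] := by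
      simp [PySem.Set.add_eq_ite]; omega
    rw [hps]
    simp only [List.foldl]
    rw [if_pos (show (0:Int) ≤ c ∧ c ≤ n by omega)]
    rw [if_pos (show c * c + (n - c) * (n - c) < n * n ∧ 0 < c * c + (n - c) * (n - c) by
      constructor <;> nlinarith)]
    rw [if_pos (show 0 < c * c + (n - c) * (n - c) ∧ c * c + (n - c) * (n - c) < n * n by
      constructor <;> nlinarith)]
    rw [e1]
    rw [if_pos (show (0:Int) ≤ n - c ∧ n - c ≤ n by omega)]
    rw [e2]
    rw [if_pos (show 2 * c * (n - c) < n * n ∧ 0 < 2 * c * (n - c) by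
      constructor <;> nlinarith)]
    rw [if_pos (show 0 < 2 * c * (n - c) ∧ 2 * c * (n - c) < n * n by
      constructor <;> nlinarith)]
    rw [show n * n - 2 * c * (n - c) = c * c + (n - c) * (n - c) by ring]
    rw [PySem.Set.add_of_mem (by simp [PySem.Set.mem_add])]
    exact PySem.Set.add_of_mem (by simp [PySem.Set.mem_add])

theorem pvStepA_00n {n : Int} (hn : 0 < n) (s : PySem.Set Int) :
    pvStepA n s 0 0 n = s := by
  simp only [pvStepA]
  split_ifs with h1 h2 h3 h4 <;> try (exfalso; omega)
  have h0n : ¬ ((0:Int) = n) := by omega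
  norm_num [PySem.Set.add_eq_ite, PySem.Set.empty, List.foldl, h0n]

theorem pvStepA_0b0 {n b : Int} (hb : 0 < b) (hbn : b < n) (s : PySem.Set Int) :
    pvStepA n s 0 b 0 =
      PySem.Set.add (PySem.Set.add s (b * (2 * n - b))) ((n - b) * (n - b)) := by
  have hA : 0 < (n - b) * (n - b) := mul_pos (by omega) (by omega)
  have hB : 0 < b * (2 * n - b) := mul_pos hb (by omega)
  have hid : n * n = b * (2 * n - b) + (n - b) * (n - b) := by ring
  simp only [pvStepA]
  split_ifs with h1 h2 h3 h4 <;> try (exfalso; omega)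
  norm_num [List.foldl]
  rw [show PySem.Set.add [n - b] 0 = [n - b, 0] by simp [PySem.Set.add_eq_ite]; omega]
  simp only [List.foldl]
  rw [show (n - b) * b + (n - (n - b)) * n = b * (2 * n - b) by ring]
  rw [if_pos (show (0:Int) ≤ n - b ∧ n - b ≤ n by omega)]
  rw [if_pos (show b * (2 * n - b) < n * n ∧ 0 < b * (2 * n - b) by constructor <;> linarith)]
  rw [if_pos (show 0 < b * (2 * n - b) ∧ b * (2 * n - b) < n * n by constructor <;> linarith)]
  rw [show n * n - b * (2 * n - b) = (n - b) * (n - b) by ring]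
  rw [if_pos (show (0:Int) ≤ 0 ∧ (0:Int) ≤ n by omega)]
  rw [show (0:Int) * b + (n - 0) * n = n * n by ring]
  rw [if_neg (show ¬(n * n < n * n ∧ 0 < n * n) from fun h => lt_irrefl _ h.1)]
  rw [if_neg (show ¬(0 < n * n ∧ n * n < n * n) from fun h => lt_irrefl _ h.2)]

theorem pvStepA_0bc {n b : Int} (hb : 0 < b) (hbn : b < n) (s : PySem.Set Int) :
    pvStepA n s 0 b (n - b) =
      PySem.Set.add (PySem.Set.add s (b * (2 * n - b))) ((n - b) * (n - b)) := by
  have hA : 0 < (n - b) * (n - b) := mul_pos (by omega) (by omega)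
  have hB : 0 < b * (2 * n - b) := mul_pos hb (by omega)
  have hid : n * n = b * (2 * n - b) + (n - b) * (n - b) := by ring
  simp only [pvStepA]
  split_ifs with h1 h2 h3 h4 h5 <;> try (exfalso; omega)
  norm_num [List.foldl]
  rw [show PySem.Set.add [n] b = [n, b] by simp [PySem.Set.add_eq_ite]; omega]
  simp only [List.foldl]
  rw [show n * n + (n - n) * b = n * n by ring]
  rw [if_pos (show (0:Int) ≤ n ∧ n ≤ n by omega)]
  rw [if_neg (show ¬(n * n < n * n ∧ 0 < n * n) from fun h => lt_irrefl _ h.1)]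
  rw [if_neg (show ¬(0 < n * n ∧ n * n < n * n) from fun h => lt_irrefl _ h.2)]
  rw [if_pos (show (0:Int) ≤ b ∧ b ≤ n by omega)]
  rw [show b * n + (n - b) * b = b * (2 * n - b) by ring]
  rw [if_pos (show b * (2 * n - b) < n * n ∧ 0 < b * (2 * n - b) by constructor <;> linarith)]
  rw [if_pos (show 0 < b * (2 * n - b) ∧ b * (2 * n - b) < n * n by constructor <;> linarith)]
  rw [show n * n - b * (2 * n - b) = (n - b) * (n - b) by ring]

theorem pvStepA_a00 {n a : Int} (ha : 0 < a) (han : a < n) (s : PySem.Set Int) :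
    pvStepA n s a 0 0 =
      PySem.Set.add (PySem.Set.add s ((n - a) * (n - a))) (n * n - (n - a) * (n - a)) := by
  have hA : 0 < (n - a) * (n - a) := mul_pos (by omega) (by omega)
  have hB : 0 < a * (2 * n - a) := mul_pos ha (by omega)
  have hid : n * n = a * (2 * n - a) + (n - a) * (n - a) := by ring
  simp only [pvStepA]
  split_ifs with h1 h2 h3 h4 h5 <;> try (exfalso; omega)
  norm_num [List.foldl]
  rw [show PySem.Set.add [n] a = [n, a] by simp [PySem.Set.add_eq_ite]; omega]
  simp only [List.foldl]
  rw [show (n - n) * (n - a) = 0 by ring]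
  rw [if_pos (show (0:Int) ≤ n ∧ n ≤ n by omega)]
  rw [if_neg (show ¬((0:Int) < n * n ∧ (0:Int) < 0) from fun h => lt_irrefl _ h.2)]
  rw [if_neg (show ¬((0:Int) < 0 ∧ (0:Int) < n * n) from fun h => lt_irrefl _ h.1)]
  rw [if_pos (show (0:Int) ≤ a ∧ a ≤ n by omega)]
  rw [if_pos (show (n - a) * (n - a) < n * n ∧ 0 < (n - a) * (n - a) by constructor <;> linarith)]
  rw [if_pos (show 0 < (n - a) * (n - a) ∧ (n - a) * (n - a) < n * n by constructor <;> linarith)]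

theorem pvStepA_a0c {n a : Int} (ha : 0 < a) (han : a < n) (s : PySem.Set Int) :
    pvStepA n s a 0 (n - a) =
      PySem.Set.add (PySem.Set.add s ((n - a) * (n - a))) (n * n - (n - a) * (n - a)) := by
  have hA : 0 < (n - a) * (n - a) := mul_pos (by omega) (by omega)
  have hB : 0 < a * (2 * n - a) := mul_pos ha (by omega)
  have hid : n * n = a * (2 * n - a) + (n - a) * (n - a) := by ring
  simp only [pvStepA]
  split_ifs with h1 h2 h3 h4 h5 <;> try (exfalso; omega)
  norm_num [List.foldl]
  rw [show PySem.Set.add [n - a] 0 = [n - a, 0] by simp [PySem.Set.add_eq_ite]; omega]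
  simp only [List.foldl]
  rw [if_pos (show (0:Int) ≤ n - a ∧ n - a ≤ n by omega)]
  rw [if_pos (show (n - a) * (n - a) < n * n ∧ 0 < (n - a) * (n - a) by constructor <;> linarith)]
  rw [if_pos (show 0 < (n - a) * (n - a) ∧ (n - a) * (n - a) < n * n by constructor <;> linarith)]
  rw [if_pos (show (0:Int) ≤ 0 ∧ (0:Int) ≤ n by omega)]
  rw [show (0:Int) * (n - a) = 0 by ring]
  rw [if_neg (show ¬((0:Int) < n * n ∧ (0:Int) < 0) from fun h => lt_irrefl _ h.2)]
  rw [if_neg (show ¬((0:Int) < 0 ∧ (0:Int) < n * n) from fun h => lt_irrefl _ h.1)]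

def pvInv (n : Int) (S : PySem.Set Int) : Prop :=
  ∀ m : Int, 1 ≤ m → m ≤ n - 1 → m * m ∈ S ∧ n * n - m * m ∈ S

theorem pvRangeSplit (n : Int) (hn : 0 < n) :
    PySem.List.pyRange 0 (n + 1) 1 = [0] ++ PySem.List.pyRange 1 n 1 ++ [n] := by
  rw [PySem.List.pyRange_one_cons (by omega), show (0:Int) + 1 = 1 by ring,
    PySem.List.pyRange_one_append 1 n (n + 1) (by omega) (by omega),
    PySem.List.pyRange_one_singleton]
  rfl

theorem pvCLoop00 {n : Int} (hn : 0 < n) (s : PySem.Set Int) :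
    (PySem.List.pyRange 0 (n + 1) 1).foldl (fun s c => pvStepA n s 0 0 c) s
      = (PySem.List.pyRange 1 n 1).foldl
          (fun s c => PySem.Set.add (PySem.Set.add s (c * c + (n - c) * (n - c))) (2 * c * (n - c))) s := by
  rw [pvRangeSplit n hn]
  rw [List.foldl_append, List.foldl_append]
  simp only [List.foldl_cons, List.foldl_nil]
  rw [PySem.List.foldl_congr_mem' (PySem.List.pyRange 1 n 1)
      (fun s c => pvStepA n s 0 0 c)
      (fun s c => PySem.Set.add (PySem.Set.add s (c * c + (n - c) * (n - c))) (2 * c * (n - c)))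
      (pvStepA n s 0 0 0)
      (by intro c hc acc
          rw [PySem.List.mem_pyRange_one] at hc
          exact pvStepA_00c (by omega) (by omega) acc)]
  rw [pvStepA_000 hn]
  rw [pvStepA_00n hn]

theorem pvCLoop0b {n b : Int} (hb : 0 < b) (hbn : b < n) (s : PySem.Set Int) :
    (PySem.List.pyRange 0 (n + 1 - b) 1).foldl (fun s c => pvStepA n s 0 b c) s
      = PySem.Set.add (PySem.Set.add s (b * (2 * n - b))) ((n - b) * (n - b)) := by
  rw [show n + 1 - b = (n - b) + 1 by ring]
  rw [PySem.List.pyRange_one_cons (by omega), show (0:Int) + 1 = 1 by ring,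
    PySem.List.pyRange_one_append 1 (n - b) ((n - b) + 1) (by omega) (by omega),
    PySem.List.pyRange_one_singleton]
  rw [show (0 : Int) :: (PySem.List.pyRange 1 (n - b) 1 ++ [n - b])
      = [0] ++ PySem.List.pyRange 1 (n - b) 1 ++ [n - b] by rfl]
  rw [List.foldl_append, List.foldl_append]
  simp only [List.foldl_cons, List.foldl_nil]
  rw [pvStepA_0b0 hb hbn]
  rw [pvFoldlFix _ (fun _ => True) _ _ trivial
      (by intro c hc t _
          rw [PySem.List.mem_pyRange_one] at hc
          exact pvStepA_skip_b_mid hb (by omega) (by omega) t)]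
  rw [pvStepA_0bc hb hbn]
  rw [PySem.Set.add_of_mem (by simp [PySem.Set.mem_add])]
  rw [PySem.Set.add_of_mem (by simp [PySem.Set.mem_add])]

theorem pvCLoopA {n a : Int} (ha : 0 < a) (han : a < n) (S : PySem.Set Int)
    (hS : pvInv n S) :
    (PySem.List.pyRange 0 (n + 1 - a) 1).foldl (fun s c => pvStepA n s a 0 c) S = S := by
  have hm := hS (n - a) (by omega) (by omega)
  rw [show n + 1 - a = (n - a) + 1 by ring]
  rw [PySem.List.pyRange_one_cons (by omega), show (0:Int) + 1 = 1 by ring,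
    PySem.List.pyRange_one_append 1 (n - a) ((n - a) + 1) (by omega) (by omega),
    PySem.List.pyRange_one_singleton]
  rw [show (0 : Int) :: (PySem.List.pyRange 1 (n - a) 1 ++ [n - a])
      = [0] ++ PySem.List.pyRange 1 (n - a) 1 ++ [n - a] by rfl]
  rw [List.foldl_append, List.foldl_append]
  simp only [List.foldl_cons, List.foldl_nil]
  rw [pvStepA_a00 ha han, PySem.Set.add_of_mem (by simp [PySem.Set.mem_add, hm.2]),
    PySem.Set.add_of_mem hm.1]
  rw [pvFoldlFix _ (fun _ => True) _ _ trivial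
      (by intro c hc t _
          rw [PySem.List.mem_pyRange_one] at hc
          exact pvStepA_skip_a_mid ha (by omega) (by omega) t)]
  rw [pvStepA_a0c ha han, PySem.Set.add_of_mem (by simp [PySem.Set.mem_add, hm.2]),
    PySem.Set.add_of_mem hm.1]

theorem pvBLoopA {n a : Int} (ha : 0 < a) (han : a ≤ n) (S : PySem.Set Int)
    (hS : pvInv n S) :
    (PySem.List.pyRange 0 (n + 1 - a) 1).foldl (fun s b =>
      (PySem.List.pyRange 0 (n + 1 - a - b) 1).foldl (fun s c => pvStepA n s a b c) s) S
      = S := by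
  by_cases han' : a = n
  · subst han'
    rw [show a + 1 - a = (0:Int) + 1 by ring, PySem.List.pyRange_one_singleton]
    simp only [List.foldl_cons, List.foldl_nil]
    rw [show (0:Int) + 1 - 0 = (0:Int) + 1 by ring, PySem.List.pyRange_one_singleton]
    simp only [List.foldl_cons, List.foldl_nil]
    exact pvStepA_n00 S
  · rw [PySem.List.pyRange_one_cons (by omega), show (0:Int) + 1 = 1 by ring]
    simp only [List.foldl_cons]
    rw [show n + 1 - a - 0 = n + 1 - a by ring]
    rw [pvCLoopA ha (by omega) S hS]
    refine pvFoldlFix _ (fun _ => True) _ _ trivial ?_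
    intro b hb t _
    rw [PySem.List.mem_pyRange_one] at hb
    refine pvFoldlFix _ (fun _ => True) _ _ trivial ?_
    intro c hc u _
    rw [PySem.List.mem_pyRange_one] at hc
    exact pvStepA_skip_ab ha hb.1 (by omega) (by omega) u

theorem pvInvAlt (n : Int) : pvInv n (get_comp2_k_values_v1_alt n) := by
  intro m hm1 hm2
  unfold get_comp2_k_values_v1_alt
  have hmem : (n - m) ∈ PySem.List.pyRange 1 n 1 := by
    rw [PySem.List.mem_pyRange_one]; omega
  have h := pvMemFold2 (f := fun b => b * (2 * n - b)) (g := fun b => (n - b) * (n - b))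
    (PySem.List.pyRange 1 n 1)
    ((PySem.List.pyRange 1 n 1).foldl (fun s c =>
      PySem.Set.add (PySem.Set.add s (c * c + (n - c) * (n - c))) (2 * c * (n - c)))
      PySem.Set.empty) (n - m) hmem
  constructor
  · have := h.2
    simpa [show n - (n - m) = m by ring] using this
  · have := h.1
    simpa [show (n - m) * (2 * n - (n - m)) = n * n - m * m by ring] using this

theorem pvMain (n : Int) : get_comp2_k_values_v1 n = get_comp2_k_values_v1_alt n := by
  rcases lt_trichotomy n 0 with h | h | h
  · unfold get_comp2_k_values_v1 get_comp2_k_values_v1_alt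
    rw [PySem.List.pyRange_one_eq_nil (by omega : n + 1 ≤ 0),
      PySem.List.pyRange_one_eq_nil (by omega : n ≤ 1)]
    rfl
  · subst h; decide
  · have hInv := pvInvAlt n
    unfold get_comp2_k_values_v1
    rw [PySem.List.pyRange_one_cons (show (0:Int) < n + 1 by omega),
      show (0:Int) + 1 = 1 by ring]
    simp only [List.foldl_cons]
    simp only [show n + 1 - 0 = n + 1 by ring]
    rw [pvRangeSplit n h, List.foldl_append, List.foldl_append]
    simp only [List.foldl_cons, List.foldl_nil]
    simp only [show n + 1 - 0 = n + 1 by ring]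
    rw [pvCLoop00 h]
    rw [PySem.List.foldl_congr_mem' (PySem.List.pyRange 1 n 1)
      (fun s b => (PySem.List.pyRange 0 (n + 1 - b) 1).foldl (fun s c => pvStepA n s 0 b c) s)
      (fun s b => PySem.Set.add (PySem.Set.add s (b * (2 * n - b))) ((n - b) * (n - b)))
      _
      (by intro b hb acc
          rw [PySem.List.mem_pyRange_one] at hb
          exact pvCLoop0b hb.1 (by omega) acc)]
    simp only [show n + 1 - n = (0:Int) + 1 by ring, PySem.List.pyRange_one_singleton]
    simp only [List.foldl_cons, List.foldl_nil]
    rw [pvStepA_0n0]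
    exact pvFoldlFix _ (pvInv n) (PySem.List.pyRange 1 (n + 1) 1)
      (get_comp2_k_values_v1_alt n) hInv
      (by intro a ha t ht
          rw [PySem.List.mem_pyRange_one] at ha
          exact pvBLoopA ha.1 (by omega) t ht)

-- ===== VERDICT (by name: the statement is the Claim_ definition above) =====
theorem get_comp2_k_values_v1_spec : Claim_equal_get_comp2_k_values_v1 := by
  intro n _
  unfold Spec_get_comp2_k_values_v1
  exact pvMain n
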